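-- pv_equiv track=rewrite | github.com/appinha/adventofcode_2020 | my_solutions/day_16/main.py | parse
-- ===== SOURCE A (Python) =====
-- def parse(arange, ls_tickets):
-- 	''' Parse list of tickets to get all possible indexes for field. '''
-- 	res = []
-- 	for col in range(len(ls_tickets[0])):
-- 		for row in range(len(ls_tickets)):
-- 			if ls_tickets[row][col] not in arange:
-- 				break
-- 			if row == (len(ls_tickets) - 1):
-- 				res.append(col)
-- 	return res, len(res)
-- ===== SOURCE B (Python) =====
-- def parse(arange, ls_tickets):
--     ''' Row-major elimination: keep a shrinking list of candidate columns. '''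
--     candidates = list(range(len(ls_tickets[0])))
--     for ticket in ls_tickets:
--         candidates = [col for col in candidates if ticket[col] in arange]
--     return candidates, len(candidates)
-- ===== Notes on version B (the rewrite author's own statement) =====
-- stated objective: alternative
-- what changed: Column-major scan with an early break per column is replaced by a single row-major pass that filters a shrinking list of candidate columns.
-- outside the precondition, e.g. on parse(set(), [[1, 2], [3]]): A returns ([], 0), B returns ([], 0)
import Mathlib
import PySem

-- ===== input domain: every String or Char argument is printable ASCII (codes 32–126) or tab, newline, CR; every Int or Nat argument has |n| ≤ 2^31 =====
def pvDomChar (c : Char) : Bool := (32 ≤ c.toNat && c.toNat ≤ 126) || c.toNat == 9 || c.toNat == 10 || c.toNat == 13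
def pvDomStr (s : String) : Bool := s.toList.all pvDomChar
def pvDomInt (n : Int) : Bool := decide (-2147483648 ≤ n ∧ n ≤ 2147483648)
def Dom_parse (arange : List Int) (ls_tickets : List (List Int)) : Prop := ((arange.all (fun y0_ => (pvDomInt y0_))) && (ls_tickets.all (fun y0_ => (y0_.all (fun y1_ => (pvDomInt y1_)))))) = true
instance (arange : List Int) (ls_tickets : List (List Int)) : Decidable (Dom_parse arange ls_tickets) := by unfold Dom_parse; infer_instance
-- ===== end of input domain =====

-- B replaces A's column-major scan (early break per column) by a row-major pass
-- filtering a shrinking candidate-column list; same cost, different traversal (objective: alternative).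

-- ===== PORT A =====
-- inner 'for row in range(len(ls_tickets))' loop: state = (res, broken flag)
def parseInner (arange : List Int) (ls_tickets : List (List Int)) (col : Int)
    (res : List Int) : List Int × Bool :=
  (PySem.List.pyRange 0 (ls_tickets.length : Int) 1).foldl
    (fun st row =>
      if st.2 then st
      else if ¬ (PySem.List.pyGetD (PySem.List.pyGetD ls_tickets row []) col 0 ∈ arange) then
        (st.1, true)
      else if row = (ls_tickets.length : Int) - 1 then (st.1 ++ [col], st.2)
      else st)
    (res, false)

def parse (arange : List Int) (ls_tickets : List (List Int)) : List Int × Int :=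
  let res :=
    (PySem.List.pyRange 0 ((PySem.List.pyGetD ls_tickets 0 []).length : Int) 1).foldl
      (fun res col => (parseInner arange ls_tickets col res).1) []
  (res, (res.length : Int))

-- ===== PORT B =====
def parse_alt (arange : List Int) (ls_tickets : List (List Int)) : List Int × Int :=
  let candidates :=
    ls_tickets.foldl
      (fun candidates ticket =>
        candidates.filter (fun col => decide (PySem.List.pyGetD ticket col 0 ∈ arange)))
      (PySem.List.pyRange 0 ((PySem.List.pyGetD ls_tickets 0 []).length : Int) 1)
  (candidates, (candidates.length : Int))

-- ===== PRECONDITION & SPEC =====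
-- Pre_ excludes empty ls_tickets (A raises IndexError on ls_tickets[0]) and ragged inputs with a row
-- shorter than the first (there A raises IndexError, or returns only by the accident of an early break).
def Pre_parse (arange : List Int) (ls_tickets : List (List Int)) : Prop :=
  ls_tickets ≠ [] ∧ ∀ r ∈ ls_tickets, ls_tickets.headI.length ≤ r.length
instance (arange : List Int) (ls_tickets : List (List Int)) : Decidable (Pre_parse arange ls_tickets) := by unfold Pre_parse; infer_instance
def pvWitness_parse : List Int × List (List Int) := ([1, 2], [[1, 3], [2, 1]])

def Spec_parse (arange : List Int) (ls_tickets : List (List Int)) (out : List Int × Int) : Prop := out = parse_alt arange ls_tickets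
instance (arange : List Int) (ls_tickets : List (List Int)) (out : List Int × Int) : Decidable (Spec_parse arange ls_tickets out) := by unfold Spec_parse; infer_instance

-- ===== CLAIM (what is proved, stated in full; the proofs are below) =====
def Claim_equal_parse : Prop := ∀ (arange : List Int) (ls_tickets : List (List Int)), Dom_parse arange ls_tickets → Pre_parse arange ls_tickets → Spec_parse arange ls_tickets (parse arange ls_tickets)

-- ===== LEMMAS AND PROOFS =====

-- the per-column condition both sides reduce to: every ticket's value in this column is in range
def passAll (arange : List Int) (ls_tickets : List (List Int)) (col : Int) : Bool :=
  ls_tickets.all (fun t => decide (PySem.List.pyGetD t col 0 ∈ arange))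

lemma parseInner_broken (arange : List Int) (ls_tickets : List (List Int)) (col : Int)
    (l : List Int) (res : List Int) :
    l.foldl
      (fun st row =>
        if st.2 then st
        else if ¬ (PySem.List.pyGetD (PySem.List.pyGetD ls_tickets row []) col 0 ∈ arange) then
          (st.1, true)
        else if row = (ls_tickets.length : Int) - 1 then (st.1 ++ [col], st.2)
        else st)
      (res, true) = (res, true) := by
  induction l with
  | nil => rfl
  | cons x xs ih => simpa using ih

lemma parseInner_suffix (arange : List Int) (ls_tickets : List (List Int)) (col : Int) :
    ∀ (j k : Nat) (res : List Int), k < ls_tickets.length → ls_tickets.length - k = j →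
    (PySem.List.pyRange (k : Int) (ls_tickets.length : Int) 1).foldl
      (fun st row =>
        if st.2 then st
        else if ¬ (PySem.List.pyGetD (PySem.List.pyGetD ls_tickets row []) col 0 ∈ arange) then
          (st.1, true)
        else if row = (ls_tickets.length : Int) - 1 then (st.1 ++ [col], st.2)
        else st)
      (res, false)
    = (if passAll arange (ls_tickets.drop k) col then (res ++ [col], false) else (res, true)) := by
  intro j
  induction j with
  | zero => intro k res hk hj; omega
  | succ j ih =>
    intro k res hk hj
    rw [PySem.List.pyRange_one_cons (by exact_mod_cast hk), List.foldl_cons]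
    have hget : PySem.List.pyGetD ls_tickets (k : Int) [] = ls_tickets[k] := by
      simp [List.getD_eq_getElem?_getD, hk]
    have hdrop : ls_tickets.drop k = ls_tickets[k] :: ls_tickets.drop (k + 1) :=
      List.drop_eq_getElem_cons hk
    rw [if_neg (by simp), hget]
    by_cases hv : PySem.List.pyGetD ls_tickets[k] col 0 ∈ arange
    · rw [if_neg (by simpa using hv)]
      by_cases hlast : k = ls_tickets.length - 1
      · rw [if_pos (show (k : Int) = (ls_tickets.length : Int) - 1 by omega)]
        have hdrop2 : ls_tickets.drop (k + 1) = [] := List.drop_eq_nil_of_le (by omega)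
        rw [PySem.List.pyRange_one_eq_nil (by omega), List.foldl_nil, hdrop, hdrop2]
        simp [passAll, hv]
      · rw [if_neg (show ¬ (k : Int) = (ls_tickets.length : Int) - 1 by omega)]
        rw [show ((k : Int) + 1) = ((k + 1 : Nat) : Int) by push_cast; ring]
        rw [ih (k + 1) res (by omega) (by omega)]
        have hcond : passAll arange (ls_tickets.drop k) col
            = passAll arange (ls_tickets.drop (k + 1)) col := by
          rw [hdrop]; simp only [passAll, List.all_cons]
          rw [decide_eq_true hv]; simp
        rw [hcond]
    · rw [if_pos (by simpa using hv), parseInner_broken]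
      have hcond : passAll arange (ls_tickets.drop k) col = false := by
        rw [hdrop]; simp only [passAll, List.all_cons]
        rw [decide_eq_false hv]; simp
      rw [hcond]; simp

lemma parseInner_eq (arange : List Int) (ls_tickets : List (List Int)) (col : Int)
    (res : List Int) (h : ls_tickets ≠ []) :
    (parseInner arange ls_tickets col res).1
      = (if passAll arange ls_tickets col then res ++ [col] else res) := by
  have hlen : 0 < ls_tickets.length := List.length_pos_iff.mpr h
  unfold parseInner
  have hsuf := parseInner_suffix arange ls_tickets col ls_tickets.length 0 res hlen (by omega)
  rw [show ((0 : Nat) : Int) = (0 : Int) by simp, List.drop_zero] at hsuf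
  rw [hsuf]
  by_cases hp : passAll arange ls_tickets col <;> simp [hp]

-- B's fold of filters is one filter by the conjunction of the row tests
lemma foldl_filter_all (arange : List Int) :
    ∀ (ts : List (List Int)) (init : List Int),
    ts.foldl (fun c t => c.filter (fun col => decide (PySem.List.pyGetD t col 0 ∈ arange))) init
      = init.filter (fun col => passAll arange ts col) := by
  intro ts
  induction ts with
  | nil => intro init; simp [passAll]
  | cons t ts ih =>
    intro init
    simp [List.foldl_cons, ih, passAll, List.filter_filter, Bool.and_comm]


-- ===== VERDICT (by name: the statement is the Claim_ definition above) =====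
theorem parse_spec : Claim_equal_parse := by
  intro arange ls_tickets hdom hpre
  unfold Spec_parse parse parse_alt
  obtain ⟨hne, -⟩ := hpre
  have hstep : (fun res col => (parseInner arange ls_tickets col res).1)
      = fun res col => if passAll arange ls_tickets col then res ++ [col] else res :=
    funext fun res => funext fun col => parseInner_eq arange ls_tickets col res hne
  rw [hstep, foldl_filter_all, PySem.List.foldl_append_if_eq_filter]
  simp
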